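-- pv_equiv track=rewrite | github.com/Melodiz/CodeRun | Summer_2024_ML/Свертка_на_пальцах/Solution.py | Convolution2D
-- ===== SOURCE A (Python) =====
-- def Convolution2D(A, B, n, m, k):
--     C = [[0] * (m - k + 1) for _ in range(n - k + 1)]
--     for i in range(n - k + 1):
--         for j in range(m - k + 1):
--             for l in range(k):
--                 for p in range(k):
--                     C[i][j] += A[i + l][j + p] * B[l][p]
--     return C
-- ===== SOURCE B (Python) =====
-- def Convolution2D(A, B, n, m, k):
--     # Reduce the 2D convolution to one 1D sparse polynomial multiplication:
--     # flatten with row stride s = m + k - 1 (wide enough that column sums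
--     # never wrap into the next row), multiply the two coefficient lists into
--     # an exponent-keyed accumulator, then read the answers off the product.
--     s = m + k - 1
--     a = [(i * s + j, v) for i, row in zip(range(n), A) for j, v in zip(range(m), row)]
--     b = [((k - 1 - l) * s + (k - 1 - p), v) for l, row in zip(range(k), B) for p, v in zip(range(k), row)]
--     c = {}
--     for ia, va in a:
--         for ib, vb in b:
--             c[ia + ib] = c.get(ia + ib, 0) + va * vb
--     return [[c.get((i + k - 1) * s + (j + k - 1), 0) for j in range(m - k + 1)]
--             for i in range(n - k + 1)]
-- ===== Notes on version B (the rewrite author's own statement) =====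
-- stated objective: alternative
-- what changed: Replaces the quadruple sliding-window loop by a reduction to one 1D sparse polynomial multiplication: both matrices are flattened row-major with stride m+k-1 (wide enough that column sums never wrap into the next row), the kernel reversed, the two coefficient lists multiplied into an exponent-keyed accumulator dict, and the output matrix read off the product's coefficients.
import Mathlib
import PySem

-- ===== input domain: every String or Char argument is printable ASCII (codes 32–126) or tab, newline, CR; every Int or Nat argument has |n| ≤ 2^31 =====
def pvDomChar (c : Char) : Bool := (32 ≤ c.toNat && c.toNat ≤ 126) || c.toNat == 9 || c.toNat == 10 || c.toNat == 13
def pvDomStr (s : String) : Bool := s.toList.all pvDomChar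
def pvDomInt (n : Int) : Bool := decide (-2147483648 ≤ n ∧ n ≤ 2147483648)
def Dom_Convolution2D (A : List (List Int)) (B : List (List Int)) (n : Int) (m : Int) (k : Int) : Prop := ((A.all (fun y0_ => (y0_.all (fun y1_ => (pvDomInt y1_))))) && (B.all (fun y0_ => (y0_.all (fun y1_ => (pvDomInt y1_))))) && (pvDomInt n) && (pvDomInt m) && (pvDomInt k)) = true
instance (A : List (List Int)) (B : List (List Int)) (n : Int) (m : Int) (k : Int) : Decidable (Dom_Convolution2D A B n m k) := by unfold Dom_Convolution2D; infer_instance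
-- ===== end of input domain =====

-- B replaces the quadruple sliding-window loop by a 1D sparse polynomial multiplication
-- (flatten with row stride m+k-1, multiply into an exponent-keyed dict, read coefficients off);
-- objective: alternative algorithm, same values.

-- ===== PORT A =====
-- Literal port of A: preallocate the (n-k+1)×(m-k+1) zero matrix, then the quadruple
-- index loop accumulating into C[i][j] in place (mutation ported as List.modify; exact:
-- under Pre_ the indices i, j are always in range, exactly as in Python).
-- '[0] * (m-k+1)' is List.replicate (m-k+1).toNat 0 (Python: a non-positive count gives []).
-- A[i+l][j+p] / B[l][p] are ported with pyGetD; under Pre_ every such access is in range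
-- (outside Pre_ Python raises IndexError and nothing is claimed).
def Convolution2D (A : List (List Int)) (B : List (List Int)) (n : Int) (m : Int) (k : Int) : List (List Int) :=
  let C0 := (PySem.List.pyRange 0 (n - k + 1) 1).map (fun _ => List.replicate (m - k + 1).toNat (0 : Int))
  (PySem.List.pyRange 0 (n - k + 1) 1).foldl (fun C i =>
    (PySem.List.pyRange 0 (m - k + 1) 1).foldl (fun C j =>
      (PySem.List.pyRange 0 k 1).foldl (fun C l =>
        (PySem.List.pyRange 0 k 1).foldl (fun C p =>
          C.modify i.toNat (fun row => row.modify j.toNat (fun v =>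
            v + PySem.List.pyGetD (PySem.List.pyGetD A (i + l) []) (j + p) 0 *
                PySem.List.pyGetD (PySem.List.pyGetD B l []) p 0))) C) C) C) C0

-- ===== PORT B =====
-- Literal port of Source B.  'a = [(i*s+j, v) for i, row in zip(range(n), A) for j, v in zip(range(m), row)]':
def pvFlatA (A : List (List Int)) (n m s : Int) : List (Int × Int) :=
  ((PySem.List.pyRange 0 n 1).zip A).flatMap (fun q =>
    ((PySem.List.pyRange 0 m 1).zip q.2).map (fun r => (q.1 * s + r.1, r.2)))
-- 'b = [((k-1-l)*s + (k-1-p), v) for l, row in zip(range(k), B) for p, v in zip(range(k), row)]':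
def pvFlatB (B : List (List Int)) (k s : Int) : List (Int × Int) :=
  ((PySem.List.pyRange 0 k 1).zip B).flatMap (fun q =>
    ((PySem.List.pyRange 0 k 1).zip q.2).map (fun r => ((k - 1 - q.1) * s + (k - 1 - r.1), r.2)))
-- 'c = {}; for ia, va in a: for ib, vb in b: c[ia+ib] = c.get(ia+ib, 0) + va*vb':
def pvProd (a b : List (Int × Int)) : PySem.Dict Int Int :=
  a.foldl (fun c q => b.foldl (fun c r =>
    c.insert (q.1 + r.1) (c.getD (q.1 + r.1) 0 + q.2 * r.2)) c) PySem.Dict.empty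
-- final comprehension reading the product's coefficients back off:
def Convolution2D_alt (A : List (List Int)) (B : List (List Int)) (n : Int) (m : Int) (k : Int) : List (List Int) :=
  let s := m + k - 1
  let c := pvProd (pvFlatA A n m s) (pvFlatB B k s)
  (PySem.List.pyRange 0 (n - k + 1) 1).map (fun i =>
    (PySem.List.pyRange 0 (m - k + 1) 1).map (fun j =>
      c.getD ((i + k - 1) * s + (j + k - 1)) 0))

-- ===== PRECONDITION & SPEC =====
-- Pre_ = exactly the inputs on which Python A returns (no IndexError): either some loop
-- range is empty (then A returns a matrix of empty sums), or A has at least n rows whose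
-- first n each have ≥ m columns and B has at least k rows whose first k each have ≥ k columns.
def Pre_Convolution2D (A : List (List Int)) (B : List (List Int)) (n : Int) (m : Int) (k : Int) : Prop :=
  n - k + 1 ≤ 0 ∨ m - k + 1 ≤ 0 ∨ k ≤ 0 ∨
  (n ≤ (A.length : Int) ∧ k ≤ (B.length : Int) ∧
   (∀ r ∈ A.take n.toNat, m ≤ (r.length : Int)) ∧
   (∀ r ∈ B.take k.toNat, k ≤ (r.length : Int)))
instance (A : List (List Int)) (B : List (List Int)) (n : Int) (m : Int) (k : Int) : Decidable (Pre_Convolution2D A B n m k) := by unfold Pre_Convolution2D; infer_instance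

def pvWitness_Convolution2D : List (List Int) × List (List Int) × Int × Int × Int :=
  ([[1, 2], [3, 4]], [[5]], 2, 2, 1)

def Spec_Convolution2D (A : List (List Int)) (B : List (List Int)) (n : Int) (m : Int) (k : Int) (out : List (List Int)) : Prop := out = Convolution2D_alt A B n m k
instance (A : List (List Int)) (B : List (List Int)) (n : Int) (m : Int) (k : Int) (out : List (List Int)) : Decidable (Spec_Convolution2D A B n m k out) := by unfold Spec_Convolution2D; infer_instance

-- ===== CLAIM (what is proved, stated in full; the proofs are below) =====
def Claim_equal_Convolution2D : Prop := ∀ (A : List (List Int)) (B : List (List Int)) (n : Int) (m : Int) (k : Int), Dom_Convolution2D A B n m k → Pre_Convolution2D A B n m k → Spec_Convolution2D A B n m k (Convolution2D A B n m k)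

-- ===== LEMMAS AND PROOFS =====

theorem pvPyRangeZero (x : Int) :
    PySem.List.pyRange 0 x 1 = (List.range x.toNat).map (fun t : Nat => (t : Int)) :=
  PySem.List.pyRange_zero x

theorem pvModifyModify {α : Type} (C : List α) (i : Nat) (f g : α → α) :
    (C.modify i f).modify i g = C.modify i (fun a => g (f a)) := by
  apply List.ext_getElem?
  intro j
  rcases h : C[j]? with _ | x
  all_goals simp [List.getElem?_modify, h]
  all_goals split_ifs <;> simp_all

theorem pvSumFlatMap {α : Type} (L : List α) (f : α → List Int) :
    (L.flatMap f).sum = (L.map (fun x => (f x).sum)).sum := by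
  simp [List.flatMap, List.sum_flatten, Function.comp_def]

theorem pvFoldlAdd2 {β : Type} (L : List β) (f : β → Int) (i j : Nat) (C : List (List Int)) :
    L.foldl (fun C x => C.modify i (fun row => row.modify j (fun v => v + f x))) C
      = C.modify i (fun row => row.modify j (fun v => v + (L.map f).sum)) := by
  induction L generalizing C with
  | nil =>
      simp only [List.foldl_nil, List.map_nil, List.sum_nil]
      rw [show (fun v : Int => v + 0) = id from funext fun v => by simp]
      rw [show (fun row : List Int => row.modify j id) = id from funext fun row => by
        simp [List.modify_id]]
      simp [List.modify_id]
  | cons x L ih =>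
      simp only [List.foldl_cons]
      rw [ih, pvModifyModify]
      congr 1
      funext row
      rw [pvModifyModify]
      congr 1
      funext v
      simp [add_assoc]

theorem pvFoldlRow {β : Type} (L : List β) (i : Nat) (F : List Int → β → List Int) (C : List (List Int)) :
    L.foldl (fun C x => C.modify i (fun row => F row x)) C = C.modify i (fun row => L.foldl F row) := by
  induction L generalizing C with
  | nil =>
      simp only [List.foldl_nil]
      rw [show (fun row : List Int => row) = id from rfl, List.modify_id]
  | cons x L ih =>
      simp only [List.foldl_cons]
      rw [ih, pvModifyModify]

theorem pvFoldlModifyGet {α : Type} (N : Nat) (g : Nat → α → α) (C : List α) (u : Nat) :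
    ((List.range N).foldl (fun C t => C.modify t (g t)) C)[u]? =
      if u < N then C[u]?.map (g u) else C[u]? := by
  induction N with
  | zero => simp
  | succ N ih =>
      rw [List.range_succ, List.foldl_append]
      simp only [List.foldl_cons, List.foldl_nil]
      rw [List.getElem?_modify]
      by_cases h2 : u = N
      · subst h2
        simp [ih]
      · have hne : N ≠ u := fun hh => h2 hh.symm
        by_cases h : u < N
        · simp [hne, ih, h, show u < N + 1 by omega]
        · simp [hne, ih, h, show ¬ u < N + 1 by omega]

theorem pvFoldlConst {α β : Type} (L : List β) (C : α) : L.foldl (fun C _ => C) C = C := by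
  induction L generalizing C <;> simp [*]

-- ---- B-side characterisation ----

theorem pvAccumGetD (L : List (Int × Int)) (c : PySem.Dict Int Int) (t : Int) :
    (L.foldl (fun c q => c.insert q.1 (c.getD q.1 0 + q.2)) c).getD t 0
      = c.getD t 0 + (L.map (fun q => if q.1 = t then q.2 else 0)).sum := by
  induction L generalizing c with
  | nil => simp
  | cons x L ih =>
      simp only [List.foldl_cons, List.map_cons, List.sum_cons]
      rw [ih, PySem.Dict.getD_insert]
      by_cases h : t = x.1
      · rw [if_pos h, if_pos h.symm, h]
        ring
      · rw [if_neg h, if_neg (fun hh => h hh.symm), zero_add]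

theorem pvProdEq (a b : List (Int × Int)) :
    pvProd a b = (a.flatMap (fun q => b.map (fun r => (q.1 + r.1, q.2 * r.2)))).foldl
      (fun c z => c.insert z.1 (c.getD z.1 0 + z.2)) PySem.Dict.empty := by
  unfold pvProd
  rw [List.foldl_flatMap]
  simp only [List.foldl_map]

theorem pvProdGetD (a b : List (Int × Int)) (t : Int) :
    (pvProd a b).getD t 0
      = (a.map (fun q => (b.map (fun r => if q.1 + r.1 = t then q.2 * r.2 else 0)).sum)).sum := by
  rw [pvProdEq, pvAccumGetD, PySem.Dict.getD_empty, zero_add, List.map_flatMap, pvSumFlatMap]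
  simp only [List.map_map, Function.comp_def]

theorem pvZipRange {α : Type} (d : α) (N : Nat) (L : List α) (h : N ≤ L.length) :
    (List.range N).zip L = (List.range N).map (fun i => (i, L.getD i d)) := by
  apply List.ext_getElem
  · simp [List.length_zip]; omega
  · intro i h1 h2
    have hi : i < N := by simpa using h2
    have hiL : i < L.length := by omega
    rw [List.getElem_zip, List.getElem_map, List.getElem_range, List.getD_eq_getElem L d hiL]

theorem pvFlatASpec (A : List (List Int)) (nn mm : Nat) (s : Int)
    (hA : nn ≤ A.length) (hrA : ∀ i, i < nn → mm ≤ (A.getD i []).length) :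
    pvFlatA A (nn : Int) (mm : Int) s
      = (List.range nn).flatMap (fun (i : Nat) => (List.range mm).map (fun (j : Nat) =>
          ((i : Int) * s + (j : Int), (A.getD i []).getD j 0))) := by
  unfold pvFlatA
  rw [pvPyRangeZero, pvPyRangeZero]
  simp only [Int.toNat_natCast]
  rw [List.zip_map_left, pvZipRange ([] : List Int) nn A hA, List.map_map, List.flatMap_map]
  rw [List.flatMap_def, List.flatMap_def]
  congr 1
  apply List.map_congr_left
  intro i hi
  have hi' : i < nn := by simpa using hi
  simp only [Function.comp_def, Prod.map_apply, id_eq]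
  rw [List.zip_map_left, pvZipRange (0 : Int) mm (A.getD i []) (hrA i hi'), List.map_map, List.map_map]
  rfl

theorem pvFlatBSpec (B : List (List Int)) (kn : Nat) (s : Int)
    (hB : kn ≤ B.length) (hrB : ∀ l, l < kn → kn ≤ (B.getD l []).length) :
    pvFlatB B (kn : Int) s
      = (List.range kn).flatMap (fun (l : Nat) => (List.range kn).map (fun (p : Nat) =>
          (((kn : Int) - 1 - (l : Int)) * s + ((kn : Int) - 1 - (p : Int)), (B.getD l []).getD p 0))) := by
  unfold pvFlatB
  rw [pvPyRangeZero]
  simp only [Int.toNat_natCast]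
  rw [List.zip_map_left, pvZipRange ([] : List Int) kn B hB, List.map_map, List.flatMap_map]
  rw [List.flatMap_def, List.flatMap_def]
  congr 1
  apply List.map_congr_left
  intro l hl
  have hl' : l < kn := by simpa using hl
  simp only [Function.comp_def, Prod.map_apply, id_eq]
  rw [List.zip_map_left, pvZipRange (0 : Int) kn (B.getD l []) (hrB l hl'), List.map_map, List.map_map]
  rfl
theorem pvStride (r1 c1 r2 c2 s : Int) (h1 : 0 ≤ c1) (h2 : c1 < s) (h3 : 0 ≤ c2) (h4 : c2 < s) :
    r1 * s + c1 = r2 * s + c2 ↔ (r1 = r2 ∧ c1 = c2) := by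
  constructor
  · intro h
    have hs : 0 < s := lt_of_le_of_lt h1 h2
    have key : (r1 - r2) * s = c2 - c1 := by linear_combination h
    have hr : r1 = r2 := by
      rcases lt_trichotomy r1 r2 with hl | he | hg
      · have h5 : r1 - r2 ≤ -1 := by omega
        nlinarith [mul_le_mul_of_nonneg_right h5 hs.le]
      · exact he
      · have h5 : 1 ≤ r1 - r2 := by omega
        nlinarith [mul_le_mul_of_nonneg_right h5 hs.le]
    refine ⟨hr, ?_⟩
    rw [hr] at h
    omega
  · rintro ⟨ha, hb⟩
    rw [ha, hb]

theorem pvSumInd (N : Nat) (c : Int) (g : Nat → Int) :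
    ((List.range N).map (fun (p : Nat) => if (p : Int) = c then g p else 0)).sum
      = if 0 ≤ c ∧ c < (N : Int) then g c.toNat else 0 := by
  induction N with
  | zero =>
      simp only [List.range_zero, List.map_nil, List.sum_nil]
      rw [if_neg (by omega)]
  | succ N ih =>
      rw [List.range_succ, List.map_append, List.sum_append, ih]
      simp only [List.map_cons, List.map_nil, List.sum_cons, List.sum_nil, add_zero]
      by_cases hc : (N : Int) = c
      · rw [if_neg (by omega), if_pos hc, if_pos (by push_cast; omega), zero_add,
          show c.toNat = N by omega]
      · by_cases h0 : 0 ≤ c ∧ c < (N : Int)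
        · rw [if_pos h0, if_neg hc, add_zero, if_pos (by push_cast; omega)]
        · rw [if_neg h0, if_neg hc, add_zero, if_neg (by push_cast; omega)]

theorem pvSumIte (M : Nat) (C : Prop) [Decidable C] (f : Nat → Int) :
    ((List.range M).map (fun (j : Nat) => if C then f j else 0)).sum
      = if C then ((List.range M).map f).sum else 0 := by
  split_ifs with h <;> simp

theorem pvSumRange (n : Nat) (f : Nat → Int) :
    ((List.range n).map f).sum = ∑ i ∈ Finset.range n, f i := rfl

theorem pvSumShift (N K u : Nat) (h : u + K ≤ N) (g : Nat → Int) :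
    ((List.range N).map (fun (i : Nat) => if u ≤ i ∧ i < u + K then g (i - u) else 0)).sum
      = ((List.range K).map g).sum := by
  rw [pvSumRange, pvSumRange, ← Finset.sum_filter]
  have hf : (Finset.range N).filter (fun i => u ≤ i ∧ i < u + K) = Finset.Ico u (u + K) := by
    ext x
    simp only [Finset.mem_filter, Finset.mem_range, Finset.mem_Ico]
    omega
  rw [hf, Finset.sum_Ico_eq_sum_range, show u + K - u = K by omega]
  exact Finset.sum_congr rfl (fun i _ => by rw [show u + i - u = i by omega])

theorem pvQuad (nn mm kn u v : Nat) (s t : Int)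
    (hkn : 1 ≤ kn) (hu : u + kn ≤ nn) (hv : v + kn ≤ mm)
    (hs : s = (mm : Int) + (kn : Int) - 1)
    (ht : t = ((u : Int) + (kn : Int) - 1) * s + ((v : Int) + (kn : Int) - 1))
    (Af Bf : Nat → Nat → Int) :
    ((List.range nn).map (fun (i : Nat) => ((List.range mm).map (fun (j : Nat) =>
      ((List.range kn).map (fun (l : Nat) => ((List.range kn).map (fun (p : Nat) =>
        if ((i : Int) * s + (j : Int) + (((kn : Int) - 1 - (l : Int)) * s + ((kn : Int) - 1 - (p : Int))) = t)
        then Af i j * Bf l p else 0)).sum)).sum)).sum)).sum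
    = ((List.range kn).map (fun (l : Nat) => ((List.range kn).map (fun (p : Nat) =>
        Af (u + l) (v + p) * Bf l p)).sum)).sum := by
  -- step 1: collapse the two kernel sums for each fixed (i, j)
  rw [List.map_congr_left (l := List.range nn)
    (g := fun (i : Nat) => ((List.range mm).map (fun (j : Nat) =>
      if 0 ≤ (i : Int) - (u : Int) ∧ (i : Int) - (u : Int) < (kn : Int) then
        (if 0 ≤ (j : Int) - (v : Int) ∧ (j : Int) - (v : Int) < (kn : Int) then
          Af i j * Bf ((i : Int) - (u : Int)).toNat ((j : Int) - (v : Int)).toNat else 0)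
      else 0)).sum) ?_]
  · -- step 2: window reindexing, inner then outer
    rw [List.map_congr_left (l := List.range nn)
      (g := fun (i : Nat) => if u ≤ i ∧ i < u + kn then
        (fun (ll : Nat) => ((List.range kn).map (fun (p : Nat) => Af (u + ll) (v + p) * Bf ll p)).sum) (i - u) else 0) ?_]
    · rw [pvSumShift nn kn u hu
        (fun (ll : Nat) => ((List.range kn).map (fun (p : Nat) => Af (u + ll) (v + p) * Bf ll p)).sum)]
    · intro i hi
      have hiN : i < nn := by simpa using hi
      beta_reduce
      rw [pvSumIte mm (0 ≤ (i : Int) - (u : Int) ∧ (i : Int) - (u : Int) < (kn : Int))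
        (fun (j : Nat) => if 0 ≤ (j : Int) - (v : Int) ∧ (j : Int) - (v : Int) < (kn : Int) then
          Af i j * Bf ((i : Int) - (u : Int)).toNat ((j : Int) - (v : Int)).toNat else 0)]
      by_cases hci : u ≤ i ∧ i < u + kn
      · rw [if_pos (by omega : 0 ≤ (i : Int) - (u : Int) ∧ (i : Int) - (u : Int) < (kn : Int)), if_pos hci]
        -- reindex the j sum
        rw [List.map_congr_left (l := List.range mm)
          (g := fun (j : Nat) => if v ≤ j ∧ j < v + kn then
            (fun (pp : Nat) => Af i (v + pp) * Bf (i - u) pp) (j - v) else 0) ?_]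
        · rw [pvSumShift mm kn v hv (fun (pp : Nat) => Af i (v + pp) * Bf (i - u) pp)]
          apply congrArg
          apply List.map_congr_left
          intro p _
          rw [show u + (i - u) = i by omega]
        · intro j hj
          beta_reduce
          by_cases hcj : v ≤ j ∧ j < v + kn
          · rw [if_pos (by omega), if_pos hcj]
            rw [show ((i : Int) - (u : Int)).toNat = i - u by omega,
                show ((j : Int) - (v : Int)).toNat = j - v by omega,
                show v + (j - v) = j by omega]
          · rw [if_neg (by omega), if_neg hcj]
      · rw [if_neg (show ¬(0 ≤ (i : Int) - (u : Int) ∧ (i : Int) - (u : Int) < (kn : Int)) by omega), if_neg hci]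
  · -- step 1 proper: fixed (i, j), evaluate the (l, p) sums
    intro i hi
    have hiN : i < nn := by simpa using hi
    apply congrArg
    apply List.map_congr_left
    intro j hj
    have hjM : j < mm := by simpa using hj
    -- rewrite the condition
    have hcond : ∀ (l p : Nat), l < kn → p < kn →
        (((i : Int) * s + (j : Int) + (((kn : Int) - 1 - (l : Int)) * s + ((kn : Int) - 1 - (p : Int))) = t)
          ↔ ((l : Int) = (i : Int) - (u : Int) ∧ (p : Int) = (j : Int) - (v : Int))) := by
      intro l p hl hp
      have hb : ((i : Int) + ((kn : Int) - 1 - (l : Int))) * s + ((j : Int) + ((kn : Int) - 1 - (p : Int)))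
          = ((u : Int) + (kn : Int) - 1) * s + ((v : Int) + (kn : Int) - 1)
          ↔ (((i : Int) + ((kn : Int) - 1 - (l : Int))) = ((u : Int) + (kn : Int) - 1)
             ∧ ((j : Int) + ((kn : Int) - 1 - (p : Int))) = ((v : Int) + (kn : Int) - 1)) := by
        apply pvStride <;> omega
      constructor
      · intro h
        have h' : ((i : Int) + ((kn : Int) - 1 - (l : Int))) * s + ((j : Int) + ((kn : Int) - 1 - (p : Int)))
            = ((u : Int) + (kn : Int) - 1) * s + ((v : Int) + (kn : Int) - 1) := by
          rw [ht] at h; linear_combination h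
        have := hb.mp h'
        omega
      · intro h
        rw [ht]
        have : ((i : Int) + ((kn : Int) - 1 - (l : Int))) * s + ((j : Int) + ((kn : Int) - 1 - (p : Int)))
            = ((u : Int) + (kn : Int) - 1) * s + ((v : Int) + (kn : Int) - 1) := hb.mpr (by omega)
        linear_combination this
    -- now compute: Σ_l Σ_p ite → single window value
    rw [List.map_congr_left (l := List.range kn)
      (g := fun (l : Nat) => if (l : Int) = (i : Int) - (u : Int) then
        (if 0 ≤ (j : Int) - (v : Int) ∧ (j : Int) - (v : Int) < (kn : Int) then
          Af i j * Bf l ((j : Int) - (v : Int)).toNat else 0) else 0) ?_]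
    · rw [pvSumInd kn ((i : Int) - (u : Int))
        (fun (l : Nat) => if 0 ≤ (j : Int) - (v : Int) ∧ (j : Int) - (v : Int) < (kn : Int) then
          Af i j * Bf l ((j : Int) - (v : Int)).toNat else 0)]
    · intro l hl
      have hlK : l < kn := by simpa using hl
      rw [List.map_congr_left (l := List.range kn)
        (g := fun (p : Nat) => if ((l : Int) = (i : Int) - (u : Int) ∧ (p : Int) = (j : Int) - (v : Int)) then
          Af i j * Bf l p else 0) ?_]
      · simp only [ite_and]
        rw [pvSumIte kn ((l : Int) = (i : Int) - (u : Int))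
          (fun (p : Nat) => if (p : Int) = (j : Int) - (v : Int) then Af i j * Bf l p else 0)]
        by_cases hcl : (l : Int) = (i : Int) - (u : Int)
        · rw [if_pos hcl, if_pos hcl, pvSumInd, ite_and]
        · rw [if_neg hcl, if_neg hcl]
      · intro p hp
        have hpK : p < kn := by simpa using hp
        rw [if_congr (hcond l p hlK hpK) rfl rfl]

-- the per-entry value of B's product dict, in the main (non-degenerate) case
theorem pvEntry (A B : List (List Int)) (nn mm kn u v : Nat)
    (hkn : 1 ≤ kn) (hA : nn ≤ A.length) (hB : kn ≤ B.length)
    (hu : u + kn ≤ nn) (hv : v + kn ≤ mm)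
    (hrA : ∀ i, i < nn → mm ≤ (A.getD i []).length)
    (hrB : ∀ l, l < kn → kn ≤ (B.getD l []).length) :
    (pvProd (pvFlatA A (nn : Int) (mm : Int) ((mm : Int) + (kn : Int) - 1))
            (pvFlatB B (kn : Int) ((mm : Int) + (kn : Int) - 1))).getD
        (((u : Int) + (kn : Int) - 1) * ((mm : Int) + (kn : Int) - 1) + ((v : Int) + (kn : Int) - 1)) 0
      = ((List.range kn).map (fun (l : Nat) => ((List.range kn).map (fun (p : Nat) =>
          (A.getD (u + l) []).getD (v + p) 0 * (B.getD l []).getD p 0)).sum)).sum := by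
  rw [pvProdGetD,
    pvFlatASpec A nn mm ((mm : Int) + (kn : Int) - 1) hA hrA,
    pvFlatBSpec B kn ((mm : Int) + (kn : Int) - 1) hB hrB,
    List.map_flatMap, pvSumFlatMap]
  simp only [List.map_map, Function.comp_def, List.map_flatMap, pvSumFlatMap]
  exact pvQuad nn mm kn u v ((mm : Int) + (kn : Int) - 1)
    (((u : Int) + (kn : Int) - 1) * ((mm : Int) + (kn : Int) - 1) + ((v : Int) + (kn : Int) - 1))
    hkn hu hv rfl rfl
    (fun i j => (A.getD i []).getD j 0) (fun l p => (B.getD l []).getD p 0)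

-- the same value, with the indexing written exactly as port A's pyGetD accesses
theorem pvEntryPy (A B : List (List Int)) (nn mm kn u v : Nat)
    (hkn : 1 ≤ kn) (hA : nn ≤ A.length) (hB : kn ≤ B.length)
    (hu : u + kn ≤ nn) (hv : v + kn ≤ mm)
    (hrA : ∀ i, i < nn → mm ≤ (A.getD i []).length)
    (hrB : ∀ l, l < kn → kn ≤ (B.getD l []).length) :
    ((List.range kn).map (fun (l : Nat) => ((List.range kn).map (fun (p : Nat) =>
        PySem.List.pyGetD (PySem.List.pyGetD A ((u : Int) + (l : Int)) []) ((v : Int) + (p : Int)) 0 *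
        PySem.List.pyGetD (PySem.List.pyGetD B ((l : Nat) : Int) []) (((p : Nat) : Int)) 0)).sum)).sum
      = (pvProd (pvFlatA A (nn : Int) (mm : Int) ((mm : Int) + (kn : Int) - 1))
            (pvFlatB B (kn : Int) ((mm : Int) + (kn : Int) - 1))).getD
        (((u : Int) + (kn : Int) - 1) * ((mm : Int) + (kn : Int) - 1) + ((v : Int) + (kn : Int) - 1)) 0 := by
  rw [pvEntry A B nn mm kn u v hkn hA hB hu hv hrA hrB]
  apply congrArg
  apply List.map_congr_left
  intro l _
  apply congrArg
  apply List.map_congr_left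
  intro p _
  rw [show ((u : Int) + (l : Int)) = (((u + l : Nat) : Int)) by push_cast; ring,
      show ((v : Int) + (p : Int)) = (((v + p : Nat) : Int)) by push_cast; ring,
      PySem.List.pyGetD_natCast, PySem.List.pyGetD_natCast,
      PySem.List.pyGetD_natCast, PySem.List.pyGetD_natCast]

-- the main (non-degenerate) case
theorem pvConvMain (A B : List (List Int)) (n m k : Int)
    (h1 : 0 < n - k + 1) (h2 : 0 < m - k + 1) (h3 : 0 < k)
    (hA : n ≤ (A.length : Int)) (hB : k ≤ (B.length : Int))
    (hrA : ∀ r ∈ A.take n.toNat, m ≤ (r.length : Int))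
    (hrB : ∀ r ∈ B.take k.toNat, k ≤ (r.length : Int)) :
    Convolution2D A B n m k = Convolution2D_alt A B n m k := by
  obtain ⟨kn, hkn⟩ : ∃ kn : Nat, k = (kn : Int) := ⟨k.toNat, by omega⟩
  subst hkn
  obtain ⟨nn, hnn⟩ : ∃ nn : Nat, n = (nn : Int) := ⟨n.toNat, by omega⟩
  subst hnn
  obtain ⟨mm, hmm⟩ : ∃ mm : Nat, m = (mm : Int) := ⟨m.toNat, by omega⟩
  subst hmm
  have hA' : nn ≤ A.length := by exact_mod_cast hA
  have hB' : kn ≤ B.length := by exact_mod_cast hB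
  have hrA' : ∀ i, i < nn → mm ≤ (A.getD i []).length := by
    intro i hi
    have hiL : i < A.length := by omega
    have hmem : A[i] ∈ A.take (nn : Int).toNat := by
      have : (A.take (nn : Int).toNat)[i]'(by simp [List.length_take]; omega) = A[i] := by
        simp [List.getElem_take]
      rw [← this]
      exact List.getElem_mem _
    have := hrA _ hmem
    rw [List.getD_eq_getElem A [] hiL]
    exact_mod_cast this
  have hrB' : ∀ l, l < kn → kn ≤ (B.getD l []).length := by
    intro l hl
    have hlL : l < B.length := by omega
    have hmem : B[l] ∈ B.take (kn : Int).toNat := by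
      have : (B.take (kn : Int).toNat)[l]'(by simp [List.length_take]; omega) = B[l] := by
        simp [List.getElem_take]
      rw [← this]
      exact List.getElem_mem _
    have := hrB _ hmem
    rw [List.getD_eq_getElem B [] hlL]
    exact_mod_cast this
  simp only [Convolution2D, Convolution2D_alt, pvPyRangeZero, List.foldl_map,
    List.map_map, Int.toNat_natCast, Function.comp_def]
  simp only [pvFoldlAdd2, pvFoldlRow]
  apply List.ext_getElem?
  intro u
  rw [pvFoldlModifyGet]
  rcases Nat.lt_or_ge u ((nn : Int) - kn + 1).toNat with hu | hu
  · simp only [List.getElem?_map, List.getElem?_range, hu, if_true]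
    simp only [Option.map_some]
    congr 1
    apply List.ext_getElem?
    intro v
    rw [pvFoldlModifyGet]
    rcases Nat.lt_or_ge v ((mm : Int) - kn + 1).toNat with hv | hv
    · simp only [List.getElem?_map, List.getElem?_range, hv, if_true,
        List.getElem?_replicate, Option.map_some]
      congr 1
      rw [zero_add]
      rw [pvEntryPy A B nn mm kn u v (by omega) hA' hB' (by omega) (by omega) hrA' hrB']
    · simp only [List.getElem?_map,
        List.getElem?_replicate, if_neg (by omega : ¬ v < ((mm : Int) - kn + 1).toNat)]
      simp [show ¬ v < ((mm : Int) - kn + 1).toNat by omega]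
  · simp [show ¬ u < ((nn : Int) - kn + 1).toNat by omega]

-- ===== VERDICT (by name: the statement is the Claim_ definition above) =====
theorem Convolution2D_spec : Claim_equal_Convolution2D := by
  intro A B n m k _ hpre
  unfold Spec_Convolution2D
  by_cases h1 : n - k + 1 ≤ 0
  · simp [Convolution2D, Convolution2D_alt, PySem.List.pyRange_one_eq_nil h1]
  · by_cases h2 : m - k + 1 ≤ 0
    · simp only [Convolution2D, Convolution2D_alt, PySem.List.pyRange_one_eq_nil h2,
        List.foldl_nil, List.map_nil]
      rw [pvFoldlConst]
      simp [Int.toNat_of_nonpos h2]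
    · by_cases h3 : k ≤ 0
      · simp only [Convolution2D, Convolution2D_alt, PySem.List.pyRange_one_eq_nil h3,
          List.foldl_nil, pvFoldlConst, pvFlatB, List.zip_nil_left, List.flatMap_nil,
          pvProd, PySem.Dict.getD_empty, List.map_const', PySem.List.length_pyRange_one,
          sub_zero]
      · rcases hpre with h | h | h | ⟨hA, hB, hrA, hrB⟩
        · omega
        · omega
        · omega
        · exact pvConvMain A B n m k (by omega) (by omega) (by omega) hA hB hrA hrB
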